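-- pv_equiv track=rewrite | github.com/Akhilesh457/PythonLab | Assignment4/ArmstrongNmber.py | cubesum
-- ===== SOURCE A (Python) =====
-- def cubesum(num):
--     total = 0
--     temp = num
--     while temp > 0:
--         digit = temp % 10
--         total += digit ** 3
--         temp //= 10
--     return total
-- ===== SOURCE B (Python) =====
-- def cubesum(num):
--     if num < 0:
--         return 0
--     return sum(int(d) ** 3 for d in str(num))
-- ===== Notes on version B (the rewrite author's own statement) =====
-- stated objective: idiomatic
-- what changed: B sums cubes of the decimal-string digit characters of num (with a guard returning 0 for negatives, matching A's non-entered loop) instead of A's arithmetic digit-extraction loop.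
import Mathlib
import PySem

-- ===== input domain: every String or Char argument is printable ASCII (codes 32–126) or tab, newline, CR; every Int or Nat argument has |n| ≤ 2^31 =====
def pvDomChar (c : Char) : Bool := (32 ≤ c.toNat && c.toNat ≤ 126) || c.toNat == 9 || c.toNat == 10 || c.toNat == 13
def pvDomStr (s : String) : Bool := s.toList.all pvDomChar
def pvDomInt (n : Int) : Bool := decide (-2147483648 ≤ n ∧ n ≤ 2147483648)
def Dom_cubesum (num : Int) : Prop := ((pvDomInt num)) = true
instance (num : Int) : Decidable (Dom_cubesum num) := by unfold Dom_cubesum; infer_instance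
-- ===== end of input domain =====

-- B sums cubes of the decimal-string digit characters instead of A's arithmetic digit-extraction loop; same values, same cost.
-- ===== PORT A =====
-- while temp > 0: digit = temp % 10; total += digit ** 3; temp //= 10
def cubesumLoop (temp total : Int) : Int :=
  if h : temp > 0 then
    cubesumLoop (PySem.Int.floordiv temp 10) (total + (PySem.Int.mod temp 10) ^ 3)
  else total
termination_by temp.toNat
decreasing_by
  simp only [PySem.Int.floordiv, Int.fdiv_eq_ediv]
  omega

def cubesum (num : Int) : Int := cubesumLoop num 0

-- ===== PORT B =====
-- sum(int(d) ** 3 for d in str(num)); int(d) on a digit char never raises, getD 0 is unreachable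
def cubesum_alt (num : Int) : Int :=
  if num < 0 then 0
  else (PySem.Int.toStr num).toList.foldl
    (fun acc c => acc + ((PySem.Int.ofStr? (String.ofList [c])).getD 0) ^ 3) 0

-- ===== PRECONDITION & SPEC =====
def Spec_cubesum (num : Int) (out : Int) : Prop := out = cubesum_alt num
instance (num : Int) (out : Int) : Decidable (Spec_cubesum num out) := by unfold Spec_cubesum; infer_instance

-- ===== CLAIM (what is proved, stated in full; the proofs are below) =====
def Claim_equal_cubesum : Prop := ∀ (num : Int), Dom_cubesum num → Spec_cubesum num (cubesum num)

-- ===== LEMMAS AND PROOFS =====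

-- ===== VERDICT (by name: the statement is the Claim_ definition above) =====
-- sum of cubes of decimal digits of n, the common reference value
def digitCubes (n : Nat) : Int :=
  if h : n = 0 then 0 else ((n % 10 : Nat) : Int) ^ 3 + digitCubes (n / 10)
decreasing_by omega

-- most-significant-first digit characters, mirroring Nat.toDigits 10
def msdChars (n : Nat) : List Char :=
  if _h : n / 10 = 0 then [Nat.digitChar n]
  else msdChars (n / 10) ++ [Nat.digitChar (n % 10)]
decreasing_by omega

lemma msdChars_ne (n : Nat) (h : ¬ n / 10 = 0) :
    msdChars n = msdChars (n / 10) ++ [Nat.digitChar (n % 10)] := by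
  conv_lhs => rw [msdChars]
  rw [dif_neg h]

lemma digitCubes_ne (n : Nat) (h : ¬ n = 0) :
    digitCubes n = ((n % 10 : Nat) : Int) ^ 3 + digitCubes (n / 10) := by
  conv_lhs => rw [digitCubes]
  rw [dif_neg h]

lemma toDigitsCore_eq_msdChars : ∀ (f n : Nat) (acc : List Char), n < f →
    Nat.toDigitsCore 10 f n acc = msdChars n ++ acc := by
  intro f
  induction f with
  | zero => omega
  | succ f ih =>
    intro n acc hn
    rw [Nat.toDigitsCore]
    by_cases h : n / 10 = 0
    · simp only [h, if_true]
      rw [msdChars, dif_pos h]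
      have : n % 10 = n := by omega
      rw [this]; rfl
    · simp only [h, if_false]
      have hlt : n / 10 < f := by omega
      rw [ih (n / 10) _ hlt, msdChars_ne n h]
      simp only [List.append_assoc, List.cons_append, List.nil_append]

lemma toDigits_eq_msdChars (n : Nat) : Nat.toDigits 10 n = msdChars n :=
  (toDigitsCore_eq_msdChars (n + 1) n [] (by omega)).trans (List.append_nil _)

lemma digitChar_val (d : Nat) (hd : d < 10) :
    (PySem.Int.ofStr? (String.ofList [Nat.digitChar d])).getD 0 = (d : Int) := by
  interval_cases d <;> decide

lemma foldl_msdChars (n : Nat) : ∀ (total : Int),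
    (msdChars n).foldl
      (fun acc c => acc + ((PySem.Int.ofStr? (String.ofList [c])).getD 0) ^ 3) total
    = total + digitCubes n := by
  induction n using Nat.strong_induction_on with
  | _ n ih =>
    intro total
    rw [msdChars]
    by_cases h : n / 10 = 0
    · rw [dif_pos h]
      simp only [List.foldl_cons, List.foldl_nil]
      rw [digitChar_val n (by omega)]
      rw [digitCubes]
      by_cases h0 : n = 0
      · subst h0; norm_num
      · simp only [h0, dite_false]
        have h10 : n % 10 = n := by omega
        rw [h10, h, digitCubes]
        norm_num
    · rw [dif_neg h]
      simp only [List.foldl_append, List.foldl_cons, List.foldl_nil]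
      rw [ih (n / 10) (by omega) total, digitChar_val (n % 10) (by omega)]
      have h0 : ¬ n = 0 := by omega
      rw [digitCubes_ne n h0]
      ring

lemma fdiv_nat (n : Nat) : PySem.Int.floordiv (n : Int) 10 = ((n / 10 : Nat) : Int) := by
  simp only [PySem.Int.floordiv, Int.fdiv_eq_ediv]
  omega

lemma fmod_nat (n : Nat) : PySem.Int.mod (n : Int) 10 = ((n % 10 : Nat) : Int) := by
  simp only [PySem.Int.mod, Int.fmod_eq_emod]
  omega

lemma cubesumLoop_eq (n : Nat) : ∀ (total : Int),
    cubesumLoop (n : Int) total = total + digitCubes n := by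
  induction n using Nat.strong_induction_on with
  | _ n ih =>
    intro total
    rw [cubesumLoop.eq_def]
    by_cases h0 : n = 0
    · subst h0
      simp [digitCubes]
    · have hpos : (n : Int) > 0 := by omega
      rw [dif_pos hpos]
      rw [fdiv_nat, fmod_nat, ih (n / 10) (by omega)]
      rw [digitCubes_ne n h0]
      ring

theorem cubesum_spec : Claim_equal_cubesum := by
  intro num _
  unfold Spec_cubesum cubesum cubesum_alt
  by_cases hneg : num < 0
  · simp only [hneg, if_true]
    rw [cubesumLoop.eq_def]
    have : ¬ num > 0 := by omega
    simp [this]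
  · simp only [hneg, if_false]
    obtain ⟨n, rfl⟩ : ∃ m : Nat, num = (m : Int) := ⟨num.toNat, by omega⟩
    rw [cubesumLoop_eq n 0]
    rw [PySem.Int.toList_toStr]
    have hchars : PySem.Int.toChars (n : Int) = msdChars n := by
      simp only [PySem.Int.toChars]
      have : ¬ ((n : Int) < 0) := by omega
      simp only [this, if_false, Int.toNat_natCast]
      exact toDigits_eq_msdChars n
    rw [hchars, foldl_msdChars n 0]
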